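-- pv_equiv track=rewrite | github.com/anaismoller/DES5YR_SNeIa_nohost | 4.early_classification.py | powers_of_two
-- ===== SOURCE A (Python) =====
-- def powers_of_two(x):
--     powers = []
--     i = 1
--     while i <= x:
--         if i & x:
--             powers.append(i)
--         i <<= 1
--     return powers
-- ===== SOURCE B (Python) =====
-- def powers_of_two(x):
--     # Recursive halving: collect the lowest bit via parity, recurse on the half, double the results.
--     if x <= 0:
--         return []
--     rest = [2 * p for p in powers_of_two(x // 2)]
--     return [1] + rest if x % 2 else rest
-- ===== Notes on version B (the rewrite author's own statement) =====
-- stated objective: simpler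
-- what changed: Replaced the iterative probe-mask scan (doubling a mask i and AND-testing it against x) by a short recursion that halves x, reads the lowest bit as a parity test, and doubles the recursive results; no bitwise operations remain.
import Mathlib
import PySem

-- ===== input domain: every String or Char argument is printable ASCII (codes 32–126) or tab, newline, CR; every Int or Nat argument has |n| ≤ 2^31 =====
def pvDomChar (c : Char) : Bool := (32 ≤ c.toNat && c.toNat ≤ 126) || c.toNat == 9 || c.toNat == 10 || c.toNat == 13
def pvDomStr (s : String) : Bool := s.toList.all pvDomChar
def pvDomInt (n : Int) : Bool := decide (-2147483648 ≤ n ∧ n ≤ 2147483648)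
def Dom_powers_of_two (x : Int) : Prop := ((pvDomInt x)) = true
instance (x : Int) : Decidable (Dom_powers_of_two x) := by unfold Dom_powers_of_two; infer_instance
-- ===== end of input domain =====

-- B replaces A's iterative probe-mask scan by a recursion that halves x and doubles the results (objective: simpler).


-- ===== PORT A =====
-- while i <= x: if i & x: powers.append(i); i <<= 1
def powersLoop (x i : Int) (acc : List Int) (hi : 0 < i) : List Int :=
  if _h : i ≤ x then
    powersLoop x (i <<< (1:Nat)) (if PySem.Int.band i x ≠ 0 then acc ++ [i] else acc)
      (by rw [Int.shiftLeft_eq]; positivity)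
  else acc
termination_by (x + 1 - i).toNat
decreasing_by rw [Int.shiftLeft_eq]; simp only [pow_one]; omega

def powers_of_two (x : Int) : List Int := powersLoop x 1 [] one_pos

-- ===== PORT B =====
-- recursive halving: lowest bit via a parity test, recurse on the half, double the recursive results
def powers_of_two_alt (x : Int) : List Int :=
  if _h : x ≤ 0 then []
  else
    let rest := (powers_of_two_alt (PySem.Int.floordiv x 2)).map (fun p => 2 * p)
    if PySem.Int.mod x 2 ≠ 0 then 1 :: rest else rest
termination_by x.toNat
decreasing_by
  simp only [PySem.Int.floordiv, Int.fdiv_eq_ediv]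
  omega

-- ===== PRECONDITION & SPEC =====
def Spec_powers_of_two (x : Int) (out : List Int) : Prop := out = powers_of_two_alt x
instance (x : Int) (out : List Int) : Decidable (Spec_powers_of_two x out) := by unfold Spec_powers_of_two; infer_instance

-- ===== CLAIM (what is proved, stated in full; the proofs are below) =====
def Claim_equal_powers_of_two : Prop := ∀ (x : Int), Dom_powers_of_two x → Spec_powers_of_two x (powers_of_two x)

-- ===== LEMMAS AND PROOFS =====

theorem pv_floordiv_two (x : Int) : PySem.Int.floordiv x 2 = x / 2 := by
  simp [PySem.Int.floordiv, Int.fdiv_eq_ediv]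

theorem pv_mod_two (x : Int) : PySem.Int.mod x 2 = x % 2 := by
  simp [PySem.Int.mod, Int.fmod_eq_emod]

-- the bit test of A expressed as the parity test of B
theorem pv_band_pow (j : Nat) (x : Int) (hx : 0 ≤ x) :
    (PySem.Int.band ((2:Int)^j) x ≠ 0) ↔ x / (2:Int)^j % 2 = 1 := by
  obtain ⟨m, rfl⟩ := Int.eq_ofNat_of_zero_le hx
  rw [show ((2:Int)^j) = ((2^j : Nat) : Int) by push_cast; ring, PySem.Int.band_natCast,
    ← Int.natCast_ediv]
  rw [Nat.two_pow_and, Nat.testBit_eq_decide_div_mod_eq]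
  have hp : 0 < 2^j := Nat.two_pow_pos j
  set k := m / 2^j with hk
  by_cases h : k % 2 = 1 <;>
    simp only [h, decide_true, decide_false, Bool.toNat_true, Bool.toNat_false,
      mul_one, mul_zero, Nat.cast_zero] <;>
    omega

theorem pv_loop_eq (n : Nat) : ∀ (x : Int), 0 ≤ x → ∀ (j : Nat) (acc : List Int),
    (x / (2:Int)^j).toNat ≤ n →
    powersLoop x ((2:Int)^j) acc (by positivity)
      = acc ++ (powers_of_two_alt (x / (2:Int)^j)).map (fun p => (2:Int)^j * p) := by
  induction n with
  | zero =>
    intro x hx j acc hn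
    rw [powersLoop]
    have hxj : x / (2:Int)^j = 0 := by
      have := Int.ediv_nonneg hx (by positivity : (0:Int) ≤ 2^j)
      omega
    have hlt : ¬ ((2:Int)^j ≤ x) := by
      intro hle
      have : (1:Int) ≤ x / 2^j := by
        rw [Int.le_ediv_iff_mul_le (by positivity : (0:Int) < 2^j)]; omega
      omega
    rw [dif_neg hlt, hxj, powers_of_two_alt]
    simp
  | succ n ih =>
    intro x hx j acc hn
    rw [powersLoop]
    by_cases hle : (2:Int)^j ≤ x
    · rw [dif_pos hle]
      set y : Int := x / (2:Int)^j with hy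
      have hy1 : (1:Int) ≤ y := by
        rw [hy, Int.le_ediv_iff_mul_le (by positivity : (0:Int) < 2^j)]; omega
      have hnext : x / (2:Int)^(j+1) = y / 2 := by
        rw [hy, pow_succ, ← Int.ediv_ediv_of_nonneg (by positivity : (0:Int) ≤ 2^j)]
      have hshift : (2:Int)^j <<< (1:Nat) = (2:Int)^(j+1) := by
        rw [Int.shiftLeft_eq]; ring
      have hbound : (x / (2:Int)^(j+1)).toNat ≤ n := by
      -- y / 2 < y since 1 ≤ y
        rw [hnext]; omega
      have step := ih x hx (j+1)
        (if PySem.Int.band ((2:Int)^j) x ≠ 0 then acc ++ [(2:Int)^j] else acc) hbound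
      rw [show powersLoop x ((2:Int)^j <<< (1:Nat))
            (if PySem.Int.band ((2:Int)^j) x ≠ 0 then acc ++ [(2:Int)^j] else acc)
            (by rw [Int.shiftLeft_eq]; positivity)
          = powersLoop x ((2:Int)^(j+1))
            (if PySem.Int.band ((2:Int)^j) x ≠ 0 then acc ++ [(2:Int)^j] else acc)
            (by positivity) from by congr 1, step]
      -- now compute the RHS: one unfolding of powers_of_two_alt at y
      rw [show powers_of_two_alt y
          = if PySem.Int.mod y 2 ≠ 0
              then 1 :: (powers_of_two_alt (PySem.Int.floordiv y 2)).map (fun p => 2 * p)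
              else (powers_of_two_alt (PySem.Int.floordiv y 2)).map (fun p => 2 * p) from by
        rw [powers_of_two_alt, dif_neg (by omega : ¬ y ≤ 0)]]
      rw [pv_mod_two, pv_floordiv_two, ← hnext]
      have hband := pv_band_pow j x hx
      rw [← hy] at hband
      have hcomp : ((fun p => (2:Int)^j * p) ∘ fun p => 2 * p) = fun p => (2:Int)^(j+1) * p := by
        funext p; simp [pow_succ]; ring
      by_cases hb : PySem.Int.band ((2:Int)^j) x ≠ 0
      · have hym : y % 2 = 1 := hband.mp hb
        rw [if_pos hb, if_pos (by omega : y % 2 ≠ 0)]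
        simp [List.map_map, hcomp, List.append_assoc]
      · have hym : ¬ (y % 2 = 1) := fun h => hb (hband.mpr h)
        have hy2 : y % 2 = 0 := by omega
        rw [if_neg hb, if_neg (by omega : ¬ y % 2 ≠ 0)]
        simp [List.map_map, hcomp]
    · rw [dif_neg hle]
      have hxj : x / (2:Int)^j = 0 :=
        Int.ediv_eq_zero_of_lt hx (by omega)
      rw [hxj, powers_of_two_alt]
      simp

-- ===== VERDICT (by name: the statement is the Claim_ definition above) =====
theorem powers_of_two_spec : Claim_equal_powers_of_two := by
  intro x _
  unfold Spec_powers_of_two powers_of_two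
  by_cases hx : x ≤ 0
  · rw [powersLoop, dif_neg (by omega : ¬ (1:Int) ≤ x), powers_of_two_alt, dif_pos hx]
  · have h := pv_loop_eq x.toNat x (by omega) 0 [] (by simp)
    simp only [pow_zero, Int.ediv_one, one_mul] at h
    rw [show powersLoop x 1 [] one_pos = powersLoop x 1 [] (by positivity) from by congr 1, h]
    simp
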